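-- pv_equiv track=rewrite | github.com/joshuawendorf21310/FusionEMS-Core | FusionEMS-Core/backend/core_app/services/incident_service.py | _sanitize_field_names
-- ===== SOURCE A (Python) =====
-- SENSITIVE_AUDIT_FIELDS = {"narrative", "patient_name", "dob", "address", "signature", "transcript"}
--
-- def _sanitize_field_names(changed_field_names: list[str]) -> list[str]:
--     sanitized: list[str] = []
--     for field_name in changed_field_names:
--         lowered = field_name.lower()
--         if any(sensitive_key in lowered for sensitive_key in SENSITIVE_AUDIT_FIELDS):
--             sanitized.append(f"{field_name}_redacted")
--         else:
--             sanitized.append(field_name)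
--     return sanitized
-- ===== SOURCE B (Python) =====
-- SENSITIVE_AUDIT_FIELDS = {"narrative", "patient_name", "dob", "address", "signature", "transcript"}
--
-- _KEYS = ("narrative", "patient_name", "dob", "address", "signature", "transcript")
--
-- def _is_sensitive(low):
--     # one left-to-right scan: at each position test all keys at once
--     for i in range(len(low) + 1):
--         if low.startswith(_KEYS, i):
--             return True
--     return False
--
-- def _sanitize_field_names(changed_field_names: list[str]) -> list[str]:
--     return [name + "_redacted" if _is_sensitive(name.lower()) else name
--             for name in changed_field_names]
-- ===== Notes on version B (the rewrite author's own statement) =====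
-- stated objective: alternative
-- what changed: Replaces the accumulator loop with six per-key substring scans ('key in lowered') by a comprehension over a helper that does a single left-to-right position scan, testing all six keys at once with tuple-startswith at each index.
import Mathlib
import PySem

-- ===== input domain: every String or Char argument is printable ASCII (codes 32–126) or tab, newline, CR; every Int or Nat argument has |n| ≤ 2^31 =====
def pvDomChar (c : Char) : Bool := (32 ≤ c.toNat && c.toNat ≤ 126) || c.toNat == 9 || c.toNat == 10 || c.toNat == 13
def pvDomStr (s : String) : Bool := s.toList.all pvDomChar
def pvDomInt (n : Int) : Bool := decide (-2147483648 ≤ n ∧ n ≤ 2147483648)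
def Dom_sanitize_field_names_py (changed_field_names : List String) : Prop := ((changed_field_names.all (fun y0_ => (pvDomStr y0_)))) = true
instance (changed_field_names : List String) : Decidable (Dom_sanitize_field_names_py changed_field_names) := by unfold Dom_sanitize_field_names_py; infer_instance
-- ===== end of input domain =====

-- B replaces A's accumulator loop with six per-key 'in' scans by a comprehension over a
-- single left-to-right position scan testing all six keys at once (objective: alternative).
-- ===== PORT A =====
-- SENSITIVE_AUDIT_FIELDS: a Python set of six distinct string literals (iteration order
-- does not affect 'any'); represented as the list of its distinct elements.
def pvSensitiveAuditFields : List String :=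
  ["narrative", "patient_name", "dob", "address", "signature", "transcript"]

def sanitize_field_names_py (changed_field_names : List String) : List String :=
  changed_field_names.foldl (fun sanitized field_name =>
    let lowered := PySem.Str.lower field_name
    if pvSensitiveAuditFields.any (fun sensitive_key => PySem.Str.isIn sensitive_key lowered) then
      sanitized ++ [field_name ++ "_redacted"]
    else
      sanitized ++ [field_name]) []

-- ===== PORT B =====
def pvKeysB : List String :=
  ["narrative", "patient_name", "dob", "address", "signature", "transcript"]

-- low.startswith(_KEYS, i) with 0 ≤ i ≤ len(low) is exactly: some key is a prefix of low[i:];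
-- the for-loop with early 'return True' is List.any over the range.
def pvIsSensitive (low : List Char) : Bool :=
  (PySem.List.pyRange 0 (low.length + 1) 1).any (fun i =>
    pvKeysB.any (fun k => PySem.Chars.startswith (low.drop i.toNat) k.toList))

def sanitize_field_names_py_alt (changed_field_names : List String) : List String :=
  changed_field_names.map (fun name =>
    if pvIsSensitive (PySem.Chars.lower name.toList) then name ++ "_redacted" else name)

-- ===== PRECONDITION & SPEC =====
def Spec_sanitize_field_names_py (changed_field_names : List String) (out : List String) : Prop := out = sanitize_field_names_py_alt changed_field_names
instance (changed_field_names : List String) (out : List String) : Decidable (Spec_sanitize_field_names_py changed_field_names out) := by unfold Spec_sanitize_field_names_py; infer_instance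

-- ===== CLAIM (what is proved, stated in full; the proofs are below) =====
def Claim_equal_sanitize_field_names_py : Prop := ∀ (changed_field_names : List String), Dom_sanitize_field_names_py changed_field_names → Spec_sanitize_field_names_py changed_field_names (sanitize_field_names_py changed_field_names)

-- ===== LEMMAS AND PROOFS =====

-- per-name agreement of the two sensitivity tests
lemma hit_eq (low : List Char) :
    pvSensitiveAuditFields.any (fun k => PySem.Chars.isIn k.toList low) = pvIsSensitive low := by
  rw [Bool.eq_iff_iff]
  simp only [pvIsSensitive, pvKeysB, pvSensitiveAuditFields, List.any_eq_true,
    PySem.List.mem_pyRange_one]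
  constructor
  · rintro ⟨k, hk, hin⟩
    obtain ⟨j, hpre⟩ := (PySem.Chars.exists_prefix_drop_iff_isIn k.toList low).mpr hin
    by_cases hj : j ≤ low.length
    · refine ⟨(j : Int), ⟨by positivity, by exact_mod_cast Nat.lt_succ_of_le hj⟩, k, hk, ?_⟩
      simpa [PySem.Chars.startswith_iff] using hpre
    · have hnil : low.drop j = [] := List.drop_eq_nil_of_le (by omega)
      have hke : k.toList = [] := List.prefix_nil.mp (hnil ▸ hpre)
      refine ⟨(low.length : Int), ⟨by positivity, by exact_mod_cast Nat.lt_succ_self _⟩, k, hk, ?_⟩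
      simp [PySem.Chars.startswith_iff, hke]
  · rintro ⟨i, _, k, hk, hsw⟩
    refine ⟨k, hk, (PySem.Chars.exists_prefix_drop_iff_isIn k.toList low).mp
      ⟨i.toNat, (PySem.Chars.startswith_iff _ _).mp hsw⟩⟩

lemma cond_eq (name : String) :
    (pvSensitiveAuditFields.any (fun k => PySem.Str.isIn k (PySem.Str.lower name)))
      = pvIsSensitive (PySem.Chars.lower name.toList) := by
  have := hit_eq (PySem.Chars.lower name.toList)
  simpa [PySem.Str.isIn_eq, PySem.Str.lower] using this

lemma foldl_eq_map (l : List String) (acc : List String) :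
    l.foldl (fun sanitized field_name =>
      let lowered := PySem.Str.lower field_name
      if pvSensitiveAuditFields.any (fun sensitive_key => PySem.Str.isIn sensitive_key lowered) then
        sanitized ++ [field_name ++ "_redacted"]
      else
        sanitized ++ [field_name]) acc
    = acc ++ l.map (fun name =>
        if pvIsSensitive (PySem.Chars.lower name.toList) then name ++ "_redacted" else name) := by
  induction l generalizing acc with
  | nil => simp
  | cons x xs ih =>
    rw [List.foldl_cons, ih, List.map_cons]
    simp only [← cond_eq x]
    split_ifs <;> simp

-- ===== VERDICT (by name: the statement is the Claim_ definition above) =====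
theorem sanitize_field_names_py_spec : Claim_equal_sanitize_field_names_py := by
  intro l _
  show sanitize_field_names_py l = sanitize_field_names_py_alt l
  rw [sanitize_field_names_py, sanitize_field_names_py_alt, foldl_eq_map, List.nil_append]
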